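-- pv_equiv track=rewrite | github.com/DFoly/ADVENT_OF_CODE | day09/solution2.py | get_memory_blocks
-- ===== SOURCE A (Python) =====
-- def get_memory_blocks(results) -> list:
--     """
--         Find and store the locations of each memory block
--         hash_map: (x,y): len(block)
--     """
--     mem_block_results = []
--     start = i = 0
--     while i < len(results) - 1:
--         if results[i] == '.':
--             start = i
--             while results[i] == '.' and i < len(results)-1:
--                 i += 1
--             # indices key and len values: i-1 to get end of mem block
--             # needs to be ordered to ensure we store in left most memory
--             mem_block_results.append((start, i-1, i-start))
--         else:
--             i += 1
--     return mem_block_results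
-- ===== SOURCE B (Python) =====
-- def get_memory_blocks(results) -> list:
--     """Two staged passes: collect the indices of '.' cells scanned by A
--     (range(len(results)-1)), then merge consecutive indices into
--     (start, end, length) blocks."""
--     dots = [i for i in range(len(results) - 1) if results[i] == '.']
--     blocks = []
--     prev = None
--     for i in dots:
--         if prev == i - 1:
--             s, _, ln = blocks.pop()
--             blocks.append((s, i, ln + 1))
--         else:
--             blocks.append((i, i, 1))
--         prev = i
--     return blocks
-- ===== Notes on version B (the rewrite author's own statement) =====
-- stated objective: alternative
-- what changed: A's nested two-pointer while-scan is replaced by two staged passes: a list comprehension materializes the '.' indices over range(len(results)-1), then a merge pass joins consecutive indices into (start, end, length) blocks.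
import Mathlib
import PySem

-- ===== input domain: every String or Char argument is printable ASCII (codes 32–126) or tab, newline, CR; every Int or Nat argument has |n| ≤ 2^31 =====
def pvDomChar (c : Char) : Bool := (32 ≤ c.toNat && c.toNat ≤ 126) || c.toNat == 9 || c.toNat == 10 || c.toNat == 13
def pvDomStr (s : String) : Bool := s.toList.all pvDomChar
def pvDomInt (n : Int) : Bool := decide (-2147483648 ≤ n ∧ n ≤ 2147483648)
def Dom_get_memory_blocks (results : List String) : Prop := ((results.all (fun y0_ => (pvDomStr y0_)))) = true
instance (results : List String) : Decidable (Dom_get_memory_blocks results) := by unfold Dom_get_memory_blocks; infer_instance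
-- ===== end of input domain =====

-- B replaces A's nested two-pointer while-scan by two staged passes (collect the '.' indices,
-- then merge consecutive indices into blocks); return values proved equal on all inputs.

-- ===== PORT A =====
-- inner 'while results[i] == "." and i < len(results)-1: i += 1'.
-- results[i] is always in range where A evaluates it (i ≤ len-1), so getD is exact;
-- fuel = len(results) at the call site is always sufficient (i strictly increases).
-- 'i < len(results)-1' uses Nat subtraction: for i ≥ 0 it decides the same as Python's int 'i < len-1'.
def aInner (results : List String) : Nat → Nat → Nat
  | 0, i => i
  | fuel+1, i =>
    if results.getD i "" = "." ∧ i < results.length - 1 then aInner results fuel (i+1)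
    else i

-- outer 'while i < len(results)-1' with the append of (start, i-1, i-start)
def aOuter (results : List String) : Nat → Nat → List (Int × Int × Int) → List (Int × Int × Int)
  | 0, _, acc => acc
  | fuel+1, i, acc =>
    if i < results.length - 1 then
      if results.getD i "" = "." then
        let j := aInner results results.length i
        aOuter results fuel j (acc ++ [((i : Int), (j : Int) - 1, (j : Int) - (i : Int))])
      else aOuter results fuel (i+1) acc
    else acc

def get_memory_blocks (results : List String) : List (Int × Int × Int) :=
  aOuter results results.length 0 []

-- ===== PORT B =====
-- 'dots = [i for i in range(len(results) - 1) if results[i] == "."]'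
-- (0 ≤ i < len-1, so Python's results[i] never raises; getD is exact there)
def bDots (results : List String) : List Int :=
  (PySem.List.pyRange 0 ((results.length : Int) - 1) 1).filter
    (fun i => results.getD i.toNat "" = ".")

-- one iteration of Source B's merge loop; state = (blocks, prev)
def bMerge (st : List (Int × Int × Int) × Option Int) (i : Int) :
    List (Int × Int × Int) × Option Int :=
  match st.2 with
  | some p =>
    if p = i - 1 then
      -- 's, _, ln = blocks.pop(); blocks.append((s, i, ln + 1))'
      match st.1.getLast? with
      | some (s, _, ln) => (st.1.dropLast ++ [(s, i, ln + 1)], some i)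
      | none => (st.1 ++ [(i, i, 1)], some i)  -- unreachable: prev set ⇒ blocks nonempty
    else (st.1 ++ [(i, i, 1)], some i)
  | none => (st.1 ++ [(i, i, 1)], some i)  -- 'prev == i - 1' is False when prev is None

def get_memory_blocks_alt (results : List String) : List (Int × Int × Int) :=
  ((bDots results).foldl bMerge ([], none)).1

-- ===== PRECONDITION & SPEC =====
def Spec_get_memory_blocks (results : List String) (out : List (Int × Int × Int)) : Prop := out = get_memory_blocks_alt results
instance (results : List String) (out : List (Int × Int × Int)) : Decidable (Spec_get_memory_blocks results out) := by unfold Spec_get_memory_blocks; infer_instance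

-- ===== CLAIM (what is proved, stated in full; the proofs are below) =====
def Claim_equal_get_memory_blocks : Prop := ∀ (results : List String), Dom_get_memory_blocks results → Spec_get_memory_blocks results (get_memory_blocks results)

-- ===== LEMMAS AND PROOFS =====

-- number of leading "." elements
def dotRun : List String → Nat
  | [] => 0
  | s :: rest => if s = "." then dotRun rest + 1 else 0

-- canonical list of maximal '.'-runs of l, indices starting at i
def runs (i : Int) : List String → List (Int × Int × Int)
  | [] => []
  | s :: rest =>
    if s = "." then
      (i, i + (dotRun rest : Int), ((1 + dotRun rest : Nat) : Int)) ::
        runs (i + 1 + (dotRun rest : Int)) (rest.drop (dotRun rest))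
    else runs (i + 1) rest
termination_by l => l.length
decreasing_by all_goals simp

theorem dotRun_le (l : List String) : dotRun l ≤ l.length := by
  induction l with
  | nil => simp [dotRun]
  | cons s rest ih => by_cases h : s = "." <;> (simp [dotRun, h]; try omega)

theorem mem_take_dotRun (l : List String) : ∀ x ∈ l.take (dotRun l), x = "." := by
  induction l with
  | nil => simp
  | cons s rest ih =>
    by_cases h : s = "."
    · simp [dotRun, h]; exact ih
    · simp [dotRun, h]

theorem head_drop_dotRun (l : List String) : ∀ y t, l.drop (dotRun l) = y :: t → y ≠ "." := by
  induction l with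
  | nil => simp [dotRun]
  | cons s rest ih =>
    by_cases h : s = "."
    · simpa [dotRun, h] using ih
    · intro y t hyt
      have h0 : dotRun (s :: rest) = 0 := by simp [dotRun, h]
      rw [h0, List.drop_zero] at hyt
      cases hyt; exact h

-- A's inner loop advances i past exactly the leading dots of (dropLast results).drop i
theorem aInner_eq (results : List String) :
    ∀ fuel i, results.dropLast.length ≤ fuel + i →
      aInner results fuel i = i + dotRun (results.dropLast.drop i) := by
  intro fuel
  induction fuel with
  | zero =>
    intro i h
    have hnil : results.dropLast.drop i = [] := List.drop_eq_nil_of_le (by omega)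
    simp [aInner, hnil, dotRun]
  | succ fuel ih =>
    intro i h
    have hlen : results.dropLast.length = results.length - 1 := List.length_dropLast
    rw [show aInner results (fuel+1) i
        = (if results.getD i "" = "." ∧ i < results.length - 1 then aInner results fuel (i+1) else i)
        from rfl]
    by_cases hi : i < results.dropLast.length
    · have hi' : i < results.length := by omega
      have hdrop := List.drop_eq_getElem_cons (l := results.dropLast) hi
      have hdl : results.dropLast[i] = results[i]'hi' := by rw [List.getElem_dropLast]
      have hget : results.getD i "" = results[i]'hi' := List.getD_eq_getElem _ _ hi'
      by_cases hd : results[i]'hi' = "."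
      · rw [if_pos ⟨by rw [hget]; exact hd, by omega⟩, ih (i+1) (by omega), hdrop, hdl]
        simp [dotRun, hd]
        omega
      · rw [if_neg (fun hc => hd (by rw [← hget]; exact hc.1)), hdrop, hdl]
        simp [dotRun, hd]
    · have hnil : results.dropLast.drop i = [] := List.drop_eq_nil_of_le (by omega)
      rw [if_neg (by intro hc; exact absurd hc.2 (by omega))]
      simp [hnil, dotRun]

-- A's outer loop computes acc ++ runs over the remaining suffix
theorem aOuter_eq (results : List String) :
    ∀ fuel i acc, results.dropLast.length + 1 ≤ fuel + i →
      aOuter results fuel i acc = acc ++ runs (i : Int) (results.dropLast.drop i) := by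
  intro fuel
  induction fuel with
  | zero =>
    intro i acc h
    have hnil : results.dropLast.drop i = [] := List.drop_eq_nil_of_le (by omega)
    simp [aOuter, hnil, runs]
  | succ fuel ih =>
    intro i acc h
    have hlen : results.dropLast.length = results.length - 1 := List.length_dropLast
    rw [show aOuter results (fuel+1) i acc
        = (if i < results.length - 1 then
             (if results.getD i "" = "." then
                aOuter results fuel (aInner results results.length i)
                  (acc ++ [((i : Int), ((aInner results results.length i : Nat) : Int) - 1,
                            ((aInner results results.length i : Nat) : Int) - (i : Int))])
              else aOuter results fuel (i+1) acc)
           else acc)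
        from rfl]
    by_cases hi : i < results.dropLast.length
    · have hi' : i < results.length := by omega
      rw [if_pos (by omega)]
      have hdrop := List.drop_eq_getElem_cons (l := results.dropLast) hi
      have hdl : results.dropLast[i] = results[i]'hi' := by rw [List.getElem_dropLast]
      have hget : results.getD i "" = results[i]'hi' := List.getD_eq_getElem _ _ hi'
      by_cases hd : results[i]'hi' = "."
      · rw [if_pos (by rw [hget]; exact hd)]
        have hj : aInner results results.length i = i + dotRun (results.dropLast.drop i) :=
          aInner_eq results results.length i (by omega)
        have hdr : dotRun (results.dropLast.drop i) = dotRun (results.dropLast.drop (i+1)) + 1 := by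
          rw [hdrop, hdl]; simp [dotRun, hd]
        set d := dotRun (results.dropLast.drop (i+1)) with hdset
        rw [hj, hdr, ih (i + (d + 1)) _ (by omega)]
        have hdd : results.dropLast.drop (i + (d + 1)) = (results.dropLast.drop (i+1)).drop d := by
          rw [List.drop_drop]; congr 1; omega
        rw [hdd]
        have hruns : runs (i : Int) (results.dropLast.drop i)
            = ((i : Int), (i : Int) + (d : Int), ((1 + d : Nat) : Int)) ::
              runs ((i : Int) + 1 + (d : Int)) ((results.dropLast.drop (i+1)).drop d) := by
          rw [hdrop, hdl, runs, if_pos hd]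
        rw [hruns]
        have hcast : (((i + (d + 1) : Nat)) : Int) = (i : Int) + 1 + (d : Int) := by push_cast; ring
        rw [hcast]
        have htr : ((i : Int), (i : Int) + 1 + (d : Int) - 1, (i : Int) + 1 + (d : Int) - (i : Int))
            = ((i : Int), (i : Int) + (d : Int), ((1 + d : Nat) : Int)) := by
          simp [Prod.ext_iff]
          constructor <;> omega
        rw [htr]
        simp
      · rw [if_neg (fun hc => hd (by rw [← hget]; exact hc)), ih (i+1) acc (by omega)]
        have hruns : runs (i : Int) (results.dropLast.drop i)
            = runs ((i : Int) + 1) (results.dropLast.drop (i+1)) := by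
          rw [hdrop, hdl, runs, if_neg hd]
        rw [hruns]
        have : (((i + 1 : Nat)) : Int) = (i : Int) + 1 := by push_cast; ring
        rw [this]
    · have hnil : results.dropLast.drop i = [] := List.drop_eq_nil_of_le (by omega)
      rw [if_neg (by omega)]
      simp [hnil, runs]

theorem runs_nil (i : Int) : runs i [] = [] := by
  rw [runs.eq_def]

-- indices (offset a) of the '.' elements of l
def dotIdx (a : Int) : List String → List Int
  | [] => []
  | s :: rest => if s = "." then a :: dotIdx (a+1) rest else dotIdx (a+1) rest

theorem dotIdx_ge (l : List String) : ∀ (a : Int), ∀ q ∈ dotIdx a l, a ≤ q := by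
  induction l with
  | nil => simp [dotIdx]
  | cons s rest ih =>
    intro a q hq
    by_cases h : s = "."
    · simp [dotIdx, h] at hq
      rcases hq with rfl | hq
      · omega
      · have := ih (a+1) q hq; omega
    · simp [dotIdx, h] at hq
      have := ih (a+1) q hq; omega

theorem dotIdx_append (l₁ l₂ : List String) :
    ∀ a : Int, dotIdx a (l₁ ++ l₂) = dotIdx a l₁ ++ dotIdx (a + (l₁.length : Int)) l₂ := by
  induction l₁ with
  | nil => intro a; simp [dotIdx]
  | cons s rest ih =>
    intro a
    have harith : a + ((s :: rest).length : Int) = (a + 1) + (rest.length : Int) := by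
      push_cast [List.length_cons]; ring
    rw [harith, List.cons_append]
    by_cases h : s = "."
    · rw [show dotIdx a (s :: (rest ++ l₂)) = a :: dotIdx (a+1) (rest ++ l₂) from by
          simp [dotIdx, h],
        show dotIdx a (s :: rest) = a :: dotIdx (a+1) rest from by simp [dotIdx, h],
        ih (a+1)]
      simp
    · rw [show dotIdx a (s :: (rest ++ l₂)) = dotIdx (a+1) (rest ++ l₂) from by
          simp [dotIdx, h],
        show dotIdx a (s :: rest) = dotIdx (a+1) rest from by simp [dotIdx, h],
        ih (a+1)]

-- bDots over a generic list: filter of the range equals dotIdx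
theorem filt_eq (l : List String) :
    ∀ (a : Int) (res : List String), 0 ≤ a →
      (∀ k : Nat, k < l.length → res.getD (a.toNat + k) "" = l.getD k "") →
      (PySem.List.pyRange a (a + (l.length : Int)) 1).filter
          (fun i => res.getD i.toNat "" = ".") = dotIdx a l := by
  induction l with
  | nil =>
    intro a res _ _
    simp [PySem.List.pyRange_one_eq_nil, dotIdx]
  | cons s rest ih =>
    intro a res ha hres
    have hcons : PySem.List.pyRange a (a + ((s :: rest).length : Int)) 1
        = a :: PySem.List.pyRange (a+1) (a + ((s :: rest).length : Int)) 1 :=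
      PySem.List.pyRange_one_cons (by push_cast [List.length_cons]; omega)
    have hend : a + ((s :: rest).length : Int) = (a+1) + (rest.length : Int) := by
      push_cast [List.length_cons]; ring
    have h0 : res.getD a.toNat "" = s := by
      have := hres 0 (by simp)
      simpa using this
    have htail : (PySem.List.pyRange (a+1) ((a+1) + (rest.length : Int)) 1).filter
        (fun i => res.getD i.toNat "" = ".") = dotIdx (a+1) rest := by
      apply ih (a+1) res (by omega)
      intro k hk
      have := hres (k+1) (by simp; omega)
      have ht : (a+1).toNat + k = a.toNat + (k+1) := by omega
      rw [ht]
      simpa using this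
    rw [hcons, hend, List.filter_cons]
    by_cases h : s = "."
    · rw [if_pos (by rw [h0]; exact decide_eq_true h), htail]
      simp [dotIdx, h]
    · rw [if_neg (by rw [h0]; simp [h]), htail]
      simp [dotIdx, h]

theorem bDots_eq (results : List String) : bDots results = dotIdx 0 results.dropLast := by
  cases results with
  | nil =>
    simp [bDots, PySem.List.pyRange_one_eq_nil, dotIdx]
  | cons r rs =>
    unfold bDots
    have hlen : ((r :: rs).length : Int) - 1 = 0 + ((r :: rs).dropLast.length : Int) := by
      simp
    rw [hlen]
    apply filt_eq (r :: rs).dropLast 0 (r :: rs) le_rfl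
    intro k hk
    have hk' : k < (r :: rs).length := by
      have : (r :: rs).dropLast.length = (r :: rs).length - 1 := List.length_dropLast
      omega
    rw [show (0 : Int).toNat + k = k from by omega,
        List.getD_eq_getElem _ _ hk', List.getD_eq_getElem _ _ hk, List.getElem_dropLast]

-- merging the indices of a further all-'.' segment extends the last block
theorem fold_dots (blocks : List (Int × Int × Int)) (s : Int) :
    ∀ (l : List String), (∀ x ∈ l, x = ".") → ∀ (p ln : Int),
      (dotIdx (p+1) l).foldl bMerge (blocks ++ [(s, p, ln)], some p)
        = (blocks ++ [(s, p + (l.length : Int), ln + (l.length : Int))],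
           some (p + (l.length : Int))) := by
  intro l
  induction l with
  | nil => intro _ p ln; simp [dotIdx]
  | cons x rest ih =>
    intro hl p ln
    have hx : x = "." := hl x (by simp)
    rw [show dotIdx (p+1) (x :: rest) = (p+1) :: dotIdx (p+1+1) rest from by simp [dotIdx, hx],
        List.foldl_cons]
    have hstep : bMerge (blocks ++ [(s, p, ln)], some p) (p+1)
        = (blocks ++ [(s, p+1, ln+1)], some (p+1)) := by
      simp [bMerge]
    rw [hstep, ih (fun y hy => hl y (by simp [hy])) (p+1) (ln+1)]
    have h1 : p + 1 + (rest.length : Int) = p + ((x :: rest).length : Int) := by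
      push_cast [List.length_cons]; ring
    have h2 : ln + 1 + (rest.length : Int) = ln + ((x :: rest).length : Int) := by
      push_cast [List.length_cons]; ring
    rw [h1, h2]

-- B's merge fold over the dot indices produces exactly the runs
theorem bFold_eq (a : Int) (l : List String) :
    ∀ blocks prev, (∀ p, prev = some p → p + 1 ∉ dotIdx a l) →
      ((dotIdx a l).foldl bMerge (blocks, prev)).1 = blocks ++ runs a l := by
  fun_induction runs a l with
  | case1 a =>
    intro blocks prev _
    simp [dotIdx]
  | case2 a rest ih =>
    intro blocks prev H
    have hdle : dotRun rest ≤ rest.length := dotRun_le rest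
    set d := dotRun rest with hd
    have hidx : dotIdx a ("." :: rest) = a :: dotIdx (a+1) rest := by simp [dotIdx]
    have hidx2 : dotIdx (a+1) rest
        = dotIdx (a+1) (rest.take d) ++ dotIdx (a+1+(d : Int)) (rest.drop d) := by
      conv_lhs => rw [(List.take_append_drop d rest).symm]
      rw [dotIdx_append, List.length_take_of_le hdle]
    have hstep : bMerge (blocks, prev) a = (blocks ++ [(a, a, 1)], some a) := by
      cases prev with
      | none => simp [bMerge]
      | some p =>
        have hne : p ≠ a - 1 := by
          intro hc
          apply H p rfl
          rw [hidx]
          have hpa : p + 1 = a := by omega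
          rw [hpa]
          exact List.mem_cons_self
        simp [bMerge, hne]
    have hfd := fold_dots blocks a (rest.take d) (by rw [hd]; exact mem_take_dotRun rest) a 1
    rw [List.length_take_of_le hdle] at hfd
    rw [hidx, List.foldl_cons, hstep, hidx2, List.foldl_append, hfd]
    have hH' : ∀ p, (some (a + (d : Int)) : Option Int) = some p
        → p + 1 ∉ dotIdx (a+1+(d : Int)) (rest.drop d) := by
      intro p hp hmem
      injection hp with hp
      subst hp
      cases hdrop : rest.drop d with
      | nil =>
        rw [hdrop] at hmem
        simp [dotIdx] at hmem
      | cons y t =>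
        have hy : y ≠ "." := head_drop_dotRun rest y t hdrop
        rw [hdrop] at hmem
        simp [dotIdx, hy] at hmem
        have := dotIdx_ge t (a+1+(d : Int)+1) _ hmem
        omega
    rw [ih (blocks ++ [(a, a + (d : Int), 1 + (d : Int))]) (some (a + (d : Int))) hH']
    have hc : ((1 + d : Nat) : Int) = 1 + (d : Int) := by push_cast; ring
    rw [hc]
    simp
  | case3 a s rest hnot ih =>
    intro blocks prev H
    have hidx : dotIdx a (s :: rest) = dotIdx (a+1) rest := by simp [dotIdx, hnot]
    rw [hidx, ih blocks prev (by intro p hp hmem; exact H p hp (by rw [hidx]; exact hmem))]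

theorem alt_eq_runs (results : List String) :
    get_memory_blocks_alt results = runs 0 results.dropLast := by
  unfold get_memory_blocks_alt
  rw [bDots_eq, bFold_eq 0 results.dropLast [] none (by simp)]
  simp

-- ===== VERDICT (by name: the statement is the Claim_ definition above) =====
theorem get_memory_blocks_spec : Claim_equal_get_memory_blocks := by
  intro results _
  unfold Spec_get_memory_blocks
  rw [alt_eq_runs]
  cases results with
  | nil => simp [get_memory_blocks, aOuter, runs_nil]
  | cons r rs =>
    unfold get_memory_blocks
    rw [aOuter_eq (r :: rs) (r :: rs).length 0 []
        (by simp [List.length_dropLast])]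
    simp
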